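-- pv_equiv track=rewrite | github.com/schlogl2017/Kmer-analysis | genome_kmers.py | kmerPositions
-- ===== SOURCE A (Python) =====
-- def get_strand_complement(sequence):
--     """Returns the complement strand of the genome."""
--     seq = sequence.upper()
--     change = str.maketrans('ACGT', 'TGCA')
--     return seq.translate(change)
--
-- def get_reverse_complement(sequence):
--     """Returns the reverse complement strand of the genome."""
--     seq = sequence.upper()
--     return get_strand_complement(seq)[::-1]
--
-- def kmerPositions(sequence, alphabet, k):
--     """ returns the position of all k-mers in sequence as a dictionary"""
--     kmerPosition = {}
--     for i in range(1,len(sequence)-k+1):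
--         kmer = sequence[i:i+k]
--         if all(base in set(alphabet) for base in kmer):
--             kmerPosition[kmer] = kmerPosition.get(kmer,[])+[i]
--     # combine kmers with their reverse complements
--     pairPosition = {}
--     for kmer, posList in kmerPosition.items():
--         krev = get_reverse_complement(kmer)
--         if (kmer < krev):
--             pairPosition[kmer] = sorted(posList + kmerPosition.get(krev, []))
--         elif (krev < kmer):
--             pairPosition[krev] = sorted(kmerPosition.get(krev, []) + posList)
--         else:
--             pairPosition[kmer] = posList
--     return pairPosition
-- ===== SOURCE B (Python) =====
-- def get_strand_complement(sequence):
--     """Returns the complement strand of the genome."""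
--     seq = sequence.upper()
--     change = str.maketrans('ACGT', 'TGCA')
--     return seq.translate(change)
--
-- def get_reverse_complement(sequence):
--     """Returns the reverse complement strand of the genome."""
--     seq = sequence.upper()
--     return get_strand_complement(seq)[::-1]
--
-- def kmerPositions(sequence, alphabet, k):
--     """returns the position of all k-mers in sequence as a dictionary
--     (k-mer merged with its reverse complement under the smaller key)"""
--     allowed = set(alphabet)
--     result = {}
--     for i in range(1, len(sequence) - k + 1):
--         kmer = sequence[i:i + k]
--         if all(base in allowed for base in kmer):
--             krev = get_reverse_complement(kmer)
--             canon = kmer if kmer <= krev else krev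
--             result.setdefault(canon, []).append(i)
--     return result
-- ===== Notes on version B (the rewrite author's own statement) =====
-- stated objective: faster
-- what changed: A builds a kmer->positions dict and then runs a second pass over its items merging each kmer with its reverse complement (re-sorting the combined lists, and rebuilding set(alphabet) for every base); B is one single scan that appends each position directly under the canonical key min(kmer, reverse complement) with the alphabet set built once, so the intermediate table, the merge pass and the sorts disappear (scan order already yields sorted lists).
-- outside the precondition, e.g. on kmerPositions('XaTG', 'aT', 1): A returns {'T': [1, 2], 'A': [2]}, B returns {'T': [1], 'A': [2]}
import Mathlib
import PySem

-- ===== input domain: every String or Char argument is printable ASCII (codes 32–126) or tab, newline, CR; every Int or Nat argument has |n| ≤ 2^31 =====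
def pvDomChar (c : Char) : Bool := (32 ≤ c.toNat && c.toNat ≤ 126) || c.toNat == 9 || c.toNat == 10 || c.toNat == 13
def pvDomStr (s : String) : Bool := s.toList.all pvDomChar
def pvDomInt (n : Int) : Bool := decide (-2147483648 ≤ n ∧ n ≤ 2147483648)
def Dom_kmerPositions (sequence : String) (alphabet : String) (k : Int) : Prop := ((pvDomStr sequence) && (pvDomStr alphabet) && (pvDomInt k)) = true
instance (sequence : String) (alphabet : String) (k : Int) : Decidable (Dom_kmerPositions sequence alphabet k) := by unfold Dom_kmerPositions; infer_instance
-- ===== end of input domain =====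

-- B fuses A's two passes (position index, then a second pass merging keys with their reverse
-- complements) into ONE scan that groups positions directly under the canonical
-- (smaller of kmer / reverse complement) key; measurably faster and shorter.

-- ===== PORT A =====
-- helper get_strand_complement: seq.upper().translate('ACGT'->'TGCA')
def getStrandComplement (s : String) : String :=
  String.ofList ((PySem.Str.upper s).toList.map
    (fun c => if c = 'A' then 'T' else if c = 'C' then 'G' else if c = 'G' then 'C' else if c = 'T' then 'A' else c))

-- helper get_reverse_complement: get_strand_complement(seq.upper())[::-1]
-- ([::-1] is list reversal: PySem.Str.slice?_none_none_neg_one)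
def getReverseComplement (s : String) : String :=
  String.ofList ((getStrandComplement (PySem.Str.upper s)).toList.reverse)

def kmerPositions (sequence : String) (alphabet : String) (k : Int) : List (String × List Int) :=
  let kmerPosition : PySem.Dict String (List Int) :=
    (PySem.List.pyRange 1 (PySem.Str.len sequence - k + 1)).foldl
      (fun d i =>
        let kmer := PySem.Str.slice sequence (some i) (some (i + k))
        if kmer.toList.all (fun base => (PySem.Set.ofList alphabet.toList).contains base) then
          d.insert kmer (d.getD kmer [] ++ [i])
        else d)
      PySem.Dict.empty
  let pairPosition : PySem.Dict String (List Int) :=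
    kmerPosition.items.foldl
      (fun pp p =>
        let krev := getReverseComplement p.1
        if p.1 < krev then pp.insert p.1 (PySem.List.sorted (p.2 ++ kmerPosition.getD krev []) (fun x => x))
        else if krev < p.1 then pp.insert krev (PySem.List.sorted (kmerPosition.getD krev [] ++ p.2) (fun x => x))
        else pp.insert p.1 p.2)
      PySem.Dict.empty
  pairPosition.items

-- ===== PORT B =====
def kmerPositions_alt (sequence : String) (alphabet : String) (k : Int) : List (String × List Int) :=
  let allowed := PySem.Set.ofList alphabet.toList
  ((PySem.List.pyRange 1 (PySem.Str.len sequence - k + 1)).foldl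
    (fun d i =>
      let kmer := PySem.Str.slice sequence (some i) (some (i + k))
      if kmer.toList.all (fun base => allowed.contains base) then
        let krev := getReverseComplement kmer
        let canon := if kmer ≤ krev then kmer else krev
        d.modify canon [] (fun l => l ++ [i])
      else d)
    PySem.Dict.empty).items

-- ===== PRECONDITION & SPEC =====
-- Pre_ excludes inputs whose sequence contains both a lowercase and a non-lowercase alphabet character
-- (the alphabet characters occurring in the sequence are mixed-case): on such inputs a kmer's positions can
-- appear under two different keys of A's upper-casing merge, which no single canonical grouping can
-- reproduce and which nobody would specify either way; every single-case input (all DNA data) is admitted.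
def Pre_kmerPositions (sequence : String) (alphabet : String) (k : Int) : Prop :=
  (sequence.toList.all (fun c => !(PySem.Chars.islower c && alphabet.toList.contains c))) = true
  ∨ (sequence.toList.all (fun c => !(alphabet.toList.contains c) || PySem.Chars.islower c)) = true
instance (sequence : String) (alphabet : String) (k : Int) : Decidable (Pre_kmerPositions sequence alphabet k) := by unfold Pre_kmerPositions; infer_instance

def pvWitness_kmerPositions : String × String × Int := ("ACGTTAC", "ACGT", 2)

def Spec_kmerPositions (sequence : String) (alphabet : String) (k : Int) (out : List (String × List Int)) : Prop := out = kmerPositions_alt sequence alphabet k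
instance (sequence : String) (alphabet : String) (k : Int) (out : List (String × List Int)) : Decidable (Spec_kmerPositions sequence alphabet k out) := by unfold Spec_kmerPositions; infer_instance

-- ===== CLAIM (what is proved, stated in full; the proofs are below) =====
def Claim_equal_kmerPositions : Prop := ∀ (sequence : String) (alphabet : String) (k : Int), Dom_kmerPositions sequence alphabet k → Pre_kmerPositions sequence alphabet k → Spec_kmerPositions sequence alphabet k (kmerPositions sequence alphabet k)

-- ===== LEMMAS AND PROOFS =====

-- proof-only abbreviations for the shared data of the two programs
def pvComp (c : Char) : Char :=
  if c = 'A' then 'T' else if c = 'C' then 'G' else if c = 'G' then 'C' else if c = 'T' then 'A' else c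

def pvKmer (sequence : String) (k : Int) (i : Int) : String :=
  PySem.Str.slice sequence (some i) (some (i + k))

def pvValid (sequence alphabet : String) (k : Int) (i : Int) : Bool :=
  (pvKmer sequence k i).toList.all (fun base => (PySem.Set.ofList alphabet.toList).contains base)

-- the valid scan positions, in scan order
def pvXs (sequence alphabet : String) (k : Int) : List Int :=
  (PySem.List.pyRange 1 (PySem.Str.len sequence - k + 1)).filter (pvValid sequence alphabet k)

def pvCanon (x : String) : String :=
  if x ≤ getReverseComplement x then x else getReverseComplement x

-- positions whose kmer is y / whose canonical kmer is c
def pvPos (sequence alphabet : String) (k : Int) (y : String) : List Int :=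
  (pvXs sequence alphabet k).filter (fun i => pvKmer sequence k i == y)

def pvW (sequence alphabet : String) (k : Int) (c : String) : List Int :=
  (pvXs sequence alphabet k).filter (fun i => pvCanon (pvKmer sequence k i) == c)

-- a grouping loop (both phase 1 of A and the single pass of B have this shape)
def pvGrp (key : Int → String) (xs : List Int) : PySem.Dict String (List Int) :=
  xs.foldl (fun d i => d.modify (key i) [] (fun l => l ++ [i])) PySem.Dict.empty

-- the body of A's merge pass, with the pair's value expressed by its characterization
def pvStep (sequence alphabet : String) (k : Int)
    (pp : PySem.Dict String (List Int)) (x : String) : PySem.Dict String (List Int) :=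
  let kp := pvGrp (fun i => pvKmer sequence k i) (pvXs sequence alphabet k)
  let krev := getReverseComplement x
  if x < krev then pp.insert x (PySem.List.sorted (pvPos sequence alphabet k x ++ kp.getD krev []) (fun v => v))
  else if krev < x then pp.insert krev (PySem.List.sorted (kp.getD krev [] ++ pvPos sequence alphabet k x) (fun v => v))
  else pp.insert x (pvPos sequence alphabet k x)

-- "lowercase-free" strings: upper is the identity there, so the reverse complement is an involution
def pvLF (x : String) : Prop := ∀ c ∈ x.toList, PySem.Chars.islower c = false

-- "all-lowercase" strings: their reverse complements are all-uppercase, so the two never collide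
def pvLC (x : String) : Prop := ∀ c ∈ x.toList, PySem.Chars.islower c = true

theorem pvComp_invol (c : Char) : pvComp (pvComp c) = c := by
  unfold pvComp; split_ifs <;> simp_all

theorem pvLF_upper {x : String} (h : pvLF x) : PySem.Str.upper x = x := by
  have h2 : (PySem.Str.upper x).toList = x.toList := by
    rw [PySem.Str.toList_upper]
    unfold PySem.Chars.upper
    rw [List.map_congr_left (fun c hc => ?_), List.map_id]
    unfold PySem.Chars.upperChar
    rw [h c hc]; simp
  calc PySem.Str.upper x = String.ofList (PySem.Str.upper x).toList := by rw [String.ofList_toList]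
    _ = _ := by rw [h2, String.ofList_toList]

theorem pvRc_eq {x : String} (h : pvLF x) :
    getReverseComplement x = String.ofList ((x.toList.map pvComp).reverse) := by
  unfold getReverseComplement getStrandComplement
  rw [pvLF_upper h, pvLF_upper h, String.toList_ofList]
  rfl

theorem pvComp_islower (c : Char) (h : PySem.Chars.islower c = false) :
    PySem.Chars.islower (pvComp c) = false := by
  unfold pvComp; split_ifs <;> first | rfl | exact h

theorem pvLF_rc {x : String} (h : pvLF x) : pvLF (getReverseComplement x) := by
  rw [pvRc_eq h]
  intro c hc
  rw [String.toList_ofList, List.mem_reverse, List.mem_map] at hc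
  obtain ⟨a, ha, rfl⟩ := hc
  exact pvComp_islower a (h a ha)

theorem pvRc_rc {x : String} (h : pvLF x) : getReverseComplement (getReverseComplement x) = x := by
  rw [pvRc_eq (pvLF_rc h), pvRc_eq h, String.toList_ofList, List.map_reverse, List.reverse_reverse,
    List.map_map]
  have h2 : pvComp ∘ pvComp = id := funext pvComp_invol
  rw [h2, List.map_id, String.ofList_toList]

theorem pvCanon_rc {x : String} (h : pvLF x) : pvCanon (getReverseComplement x) = pvCanon x := by
  unfold pvCanon
  rw [pvRc_rc h]
  rcases lt_trichotomy x (getReverseComplement x) with hlt | heq | hgt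
  · rw [if_pos hlt.le, if_neg (not_le.mpr hlt)]
  · rw [← heq]
  · rw [if_pos hgt.le, if_neg (not_le.mpr hgt)]

theorem pvCanon_fiber {x y : String} (hx : pvLF x) (hy : pvLF y) :
    pvCanon y = pvCanon x ↔ (y = x ∨ y = getReverseComplement x) := by
  constructor
  · intro hc
    have hym : pvCanon y = y ∨ pvCanon y = getReverseComplement y := by
      unfold pvCanon; split_ifs <;> simp
    have hxm : pvCanon x = x ∨ pvCanon x = getReverseComplement x := by
      unfold pvCanon; split_ifs <;> simp
    rcases hym with h1 | h1 <;> rcases hxm with h2 | h2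
    · left; rw [← h1, hc, h2]
    · right; rw [← h1, hc, h2]
    · -- rc y = canon y = canon x = x, so y = rc x
      right
      have h3 : getReverseComplement y = x := by rw [← h1, hc, h2]
      rw [← h3, pvRc_rc hy]
    · -- rc y = rc x, so y = x
      left
      have h3 : getReverseComplement y = getReverseComplement x := by rw [← h1, hc, h2]
      rw [← pvRc_rc hy, h3, pvRc_rc hx]
  · rintro (rfl | rfl)
    · rfl
    · exact pvCanon_rc hx

theorem pvToNat_inj {a b : Char} (h : a.toNat = b.toNat) : a = b := by
  have h2 : a.val = b.val := by
    rw [← UInt32.toNat_inj]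
    exact h
  exact Char.ext h2
theorem pvLt_of_toNat {a b : Char} (h : a.toNat < b.toNat) : a < b := by
  rw [Char.lt_def]
  exact UInt32.lt_iff_toNat_lt.mpr h
theorem pvIslower_iff (c : Char) : PySem.Chars.islower c = true ↔ 97 ≤ c.toNat ∧ c.toNat ≤ 122 := by
  unfold PySem.Chars.islower
  rw [Bool.and_eq_true, decide_eq_true_iff, decide_eq_true_iff, Char.le_def, Char.le_def,
    UInt32.le_iff_toNat_le, UInt32.le_iff_toNat_le]
  rfl
theorem pvToNat_ofNat (n : Nat) (h : n < 55296) : (Char.ofNat n).toNat = n := by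
  unfold Char.ofNat
  rw [dif_pos (Or.inl h)]
  unfold Char.ofNatAux Char.toNat
  simp only [UInt32.toNat, BitVec.toNat_ofNatLT]

theorem pvUpperChar_of_not_lower {c : Char} (h : PySem.Chars.islower c = false) :
    PySem.Chars.upperChar c = c := by
  unfold PySem.Chars.upperChar
  rw [h]
  simp

-- general structure of the reverse complement's character list
theorem pvRc_toList (y : String) :
    (getReverseComplement y).toList
      = (y.toList.map (fun c => pvComp (PySem.Chars.upperChar (PySem.Chars.upperChar c)))).reverse := by
  unfold getReverseComplement getStrandComplement
  rw [String.toList_ofList, String.toList_ofList, PySem.Str.toList_upper, PySem.Str.toList_upper]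
  unfold PySem.Chars.upper
  rw [List.map_map, List.map_map]
  rfl

theorem pvRc_length (y : String) :
    (getReverseComplement y).toList.length = y.toList.length := by
  rw [pvRc_toList, List.length_reverse, List.length_map]

theorem pvRc_empty : getReverseComplement "" = "" := by decide

-- character-level facts for lowercase input
theorem pvUpperChar_toNat {c : Char} (h : PySem.Chars.islower c = true) :
    (PySem.Chars.upperChar c).toNat = c.toNat - 32 := by
  unfold PySem.Chars.upperChar
  rw [if_pos h, pvToNat_ofNat]
  have := (pvIslower_iff c).mp h
  omega

theorem pvComp_toNat_range {c : Char} (h : 65 ≤ c.toNat ∧ c.toNat ≤ 90) :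
    65 ≤ (pvComp c).toNat ∧ (pvComp c).toNat ≤ 90 := by
  unfold pvComp
  split_ifs <;> first | exact ⟨by decide, by decide⟩ | exact h

theorem pvG_upper {c : Char} (h : PySem.Chars.islower c = true) :
    65 ≤ (pvComp (PySem.Chars.upperChar (PySem.Chars.upperChar c))).toNat
    ∧ (pvComp (PySem.Chars.upperChar (PySem.Chars.upperChar c))).toNat ≤ 90 := by
  have h1 := (pvIslower_iff c).mp h
  have h2 : (PySem.Chars.upperChar c).toNat = c.toNat - 32 := pvUpperChar_toNat h
  have h3 : PySem.Chars.islower (PySem.Chars.upperChar c) = false := by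
    rw [← Bool.not_eq_true, pvIslower_iff]
    omega
  rw [pvUpperChar_of_not_lower h3]
  exact pvComp_toNat_range (by omega)

theorem pvG_inj {c d : Char} (hc : PySem.Chars.islower c = true) (hd : PySem.Chars.islower d = true)
    (h : pvComp (PySem.Chars.upperChar (PySem.Chars.upperChar c))
       = pvComp (PySem.Chars.upperChar (PySem.Chars.upperChar d))) : c = d := by
  have h1 : PySem.Chars.upperChar (PySem.Chars.upperChar c)
      = PySem.Chars.upperChar (PySem.Chars.upperChar d) := by
    have h0 := congrArg pvComp h
    rwa [pvComp_invol, pvComp_invol] at h0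
  have hc3 : PySem.Chars.islower (PySem.Chars.upperChar c) = false := by
    rw [← Bool.not_eq_true, pvIslower_iff, pvUpperChar_toNat hc]
    have := (pvIslower_iff c).mp hc
    omega
  have hd3 : PySem.Chars.islower (PySem.Chars.upperChar d) = false := by
    rw [← Bool.not_eq_true, pvIslower_iff, pvUpperChar_toNat hd]
    have := (pvIslower_iff d).mp hd
    omega
  rw [pvUpperChar_of_not_lower hc3, pvUpperChar_of_not_lower hd3] at h1
  have h2 := congrArg Char.toNat h1
  rw [pvUpperChar_toNat hc, pvUpperChar_toNat hd] at h2
  have hcb := (pvIslower_iff c).mp hc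
  have hdb := (pvIslower_iff d).mp hd
  exact pvToNat_inj (by omega)

theorem pvMapG_inj : ∀ (l m : List Char),
    (∀ c ∈ l, PySem.Chars.islower c = true) → (∀ c ∈ m, PySem.Chars.islower c = true) →
    l.map (fun c => pvComp (PySem.Chars.upperChar (PySem.Chars.upperChar c)))
      = m.map (fun c => pvComp (PySem.Chars.upperChar (PySem.Chars.upperChar c))) → l = m
  | [], [], _, _, _ => rfl
  | [], _ :: _, _, _, h => by simp at h
  | _ :: _, [], _, _, h => by simp at h
  | a :: l, b :: m, hl, hm, h => by
    simp only [List.map_cons, List.cons.injEq] at h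
    have hab : a = b := pvG_inj (hl a (List.mem_cons_self)) (hm b (List.mem_cons_self)) h.1
    have := pvMapG_inj l m (fun c hc => hl c (List.mem_cons_of_mem _ hc))
      (fun c hc => hm c (List.mem_cons_of_mem _ hc)) h.2
    rw [hab, this]

theorem pvStr_toList_inj {x y : String} (h : x.toList = y.toList) : x = y := by
  rw [← String.ofList_toList (s := x), ← String.ofList_toList (s := y), h]

theorem pvRc_inj_LC {x y : String} (hx : pvLC x) (hy : pvLC y)
    (h : getReverseComplement x = getReverseComplement y) : x = y := by
  have h1 := congrArg String.toList h
  rw [pvRc_toList, pvRc_toList] at h1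
  exact pvStr_toList_inj (pvMapG_inj _ _ hx hy (List.reverse_injective h1))

theorem pvRc_chars {x : String} (hx : pvLC x) :
    ∀ c' ∈ (getReverseComplement x).toList, 65 ≤ c'.toNat ∧ c'.toNat ≤ 90 := by
  intro c' hc'
  rw [pvRc_toList, List.mem_reverse, List.mem_map] at hc'
  obtain ⟨a, ha, rfl⟩ := hc'
  exact pvG_upper (hx a ha)

theorem pvToList_ne_nil {x : String} (h : x ≠ "") : x.toList ≠ [] := by
  intro h2
  exact h (pvStr_toList_inj (by rw [h2]; rfl))

theorem pvRc_lt {x : String} (hx : pvLC x) (hne : x ≠ "") : getReverseComplement x < x := by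
  rw [String.lt_iff_toList_lt]
  rcases hl : x.toList with _ | ⟨c, t⟩
  · exact absurd hl (pvToList_ne_nil hne)
  rcases hr : (getReverseComplement x).toList with _ | ⟨c', t'⟩
  · exfalso
    have := pvRc_length x
    rw [hr, hl] at this
    simp at this
  have h1 : 65 ≤ c'.toNat ∧ c'.toNat ≤ 90 := pvRc_chars hx c' (by rw [hr]; exact List.mem_cons_self)
  have h2 : 97 ≤ c.toNat ∧ c.toNat ≤ 122 := (pvIslower_iff c).mp (hx c (by rw [hl]; exact List.mem_cons_self))
  exact List.Lex.rel (pvLt_of_toNat (by omega))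

theorem pvRc_ne_LC {x y : String} (hx : pvLC x) (hxne : x ≠ "") (hy : pvLC y) :
    y ≠ getReverseComplement x := by
  intro h
  have hlen : (getReverseComplement x).toList ≠ [] := by
    intro h2
    have := pvRc_length x
    rw [h2] at this
    exact pvToList_ne_nil hxne (List.length_eq_zero_iff.mp this.symm)
  rcases hr : (getReverseComplement x).toList with _ | ⟨c', t'⟩
  · exact hlen hr
  have h1 : 65 ≤ c'.toNat ∧ c'.toNat ≤ 90 := pvRc_chars hx c' (by rw [hr]; exact List.mem_cons_self)
  have h2 : 97 ≤ c'.toNat ∧ c'.toNat ≤ 122 := by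
    refine (pvIslower_iff c').mp (hy c' ?_)
    rw [h, hr]
    exact List.mem_cons_self
  omega

theorem pvCanon_LC {x : String} (hx : pvLC x) (hne : x ≠ "") :
    pvCanon x = getReverseComplement x := by
  unfold pvCanon
  rw [if_neg (not_le.mpr (pvRc_lt hx hne))]

theorem pvCanon_empty : pvCanon "" = "" := by
  unfold pvCanon
  rw [pvRc_empty, if_pos le_rfl]

theorem pvRc_nonempty {x : String} (hne : x ≠ "") : getReverseComplement x ≠ "" := by
  intro h
  have := pvRc_length x
  rw [h] at this
  exact pvToList_ne_nil hne (List.length_eq_zero_iff.mp this.symm)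

theorem pvCanon_fiber_LC {x y : String} (hx : pvLC x) (hxne : x ≠ "") (hy : pvLC y) :
    pvCanon y = pvCanon x ↔ y = x := by
  constructor
  · intro h
    by_cases hye : y = ""
    · exfalso
      rw [hye, pvCanon_empty, pvCanon_LC hx hxne] at h
      exact pvRc_nonempty hxne h.symm
    · rw [pvCanon_LC hy hye, pvCanon_LC hx hxne] at h
      exact pvRc_inj_LC hy hx h
  · rintro rfl
    rfl

theorem pvCanon_fiber_empty {y : String} (hy : pvLC y) : pvCanon y = "" ↔ y = "" := by
  constructor
  · intro h
    by_cases hye : y = ""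
    · exact hye
    · exfalso
      rw [pvCanon_LC hy hye] at h
      exact pvRc_nonempty hye h
  · rintro rfl
    exact pvCanon_empty

theorem pvFilter_or_perm {α : Type} (xs : List α) (p q : α → Bool)
    (h : ∀ a ∈ xs, ¬(p a = true ∧ q a = true)) :
    (xs.filter p ++ xs.filter q).Perm (xs.filter (fun a => p a || q a)) := by
  induction xs with
  | nil => simp
  | cons a t ih =>
    have ht : ∀ a ∈ t, ¬(p a = true ∧ q a = true) := fun a ha => h a (List.mem_cons_of_mem _ ha)
    by_cases hp : p a = true
    · have hq : q a = false := by
        rcases Bool.eq_false_or_eq_true (q a) with h' | h'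
        · exact absurd ⟨hp, h'⟩ (h a (List.mem_cons_self))
        · exact h'
      simp [hp, hq]
      exact ih ht
    · have hp' : p a = false := by simpa using hp
      by_cases hq : q a = true
      · simp [hp', hq]
        refine List.Perm.trans ?_ ((ih ht).cons a)
        exact List.perm_middle
      · have hq' : q a = false := by simpa using hq
        simp [hp', hq']
        exact ih ht

theorem pvOfList_append_singleton {α : Type} [BEq α] (l : List α) (a : α) :
    PySem.Set.ofList (l ++ [a]) = (PySem.Set.ofList l).add a := by
  unfold PySem.Set.ofList
  rw [List.foldl_append]
  rfl

theorem pvMem_set_contains {α : Type} [BEq α] [LawfulBEq α] (s : PySem.Set α) (a : α) :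
    PySem.Set.contains s a = decide (a ∈ s) := by
  unfold PySem.Set.contains
  simp

theorem pvOfList_map_ofList {α : Type} [BEq α] [LawfulBEq α] (g : α → α) (L : List α) :
    PySem.Set.ofList ((PySem.Set.ofList L).map g) = PySem.Set.ofList (L.map g) := by
  induction L using List.reverseRecOn with
  | nil => rfl
  | append_singleton t a ih =>
    rw [pvOfList_append_singleton, List.map_append, List.map_singleton, pvOfList_append_singleton]
    unfold PySem.Set.add
    rw [pvMem_set_contains, pvMem_set_contains]
    by_cases hm : a ∈ PySem.Set.ofList t
    · have hm' : g a ∈ PySem.Set.ofList (t.map g) := by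
        rw [PySem.Set.mem_ofList]
        exact List.mem_map_of_mem ((PySem.Set.mem_ofList t a).mp hm)
      simp only [hm, decide_true, if_pos, ih, hm']
    · rw [if_neg (by simp [hm]), List.map_append, List.map_singleton, pvOfList_append_singleton, ih]
      unfold PySem.Set.add
      rw [pvMem_set_contains]

theorem pvXs_pairwise (sequence alphabet : String) (k : Int) :
    (pvXs sequence alphabet k).Pairwise (· < ·) := by
  unfold pvXs
  refine List.Pairwise.sublist List.filter_sublist ?_
  rw [PySem.List.pyRange_of_pos _ _ (by norm_num : (0:Int) < 1)]
  refine List.Pairwise.map _ ?_ (List.pairwise_lt_range)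
  intro x y hxy
  omega

-- grouping-loop characterization
theorem pvGrp_eq_pairs (key : Int → String) (xs : List Int) :
    pvGrp key xs = (xs.map (fun i => (key i, i))).foldl
      (fun d p => d.modify p.1 [] (fun l => l ++ [p.2])) PySem.Dict.empty := by
  unfold pvGrp; rw [List.foldl_map]

theorem pvGrp_getD (key : Int → String) (xs : List Int) (y : String) :
    (pvGrp key xs).getD y [] = xs.filter (fun i => key i == y) := by
  rw [pvGrp_eq_pairs, PySem.Dict.getD_foldl_modify_append, List.filter_map]
  simp [Function.comp_def]

theorem pvGrp_keys (key : Int → String) (xs : List Int) :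
    (pvGrp key xs).keys = PySem.Set.ofList (xs.map key) := by
  unfold pvGrp
  rw [PySem.Dict.keys_foldl_modify_key]
  rfl

theorem pvGrp_nodup (key : Int → String) (xs : List Int) : (pvGrp key xs).keys.Nodup := by
  unfold pvGrp
  exact PySem.Dict.nodup_keys_foldl_modify_key _ _ _ _ _ (by simp [PySem.Dict.keys_empty])

theorem pvGrp_items (key : Int → String) (xs : List Int) :
    (pvGrp key xs).items
      = (PySem.Set.ofList (xs.map key)).map (fun y => (y, xs.filter (fun i => key i == y))) := by
  rw [PySem.Dict.items_eq_map_keys _ (pvGrp_nodup key xs) [], pvGrp_keys]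
  exact List.map_congr_left (fun y _ => by rw [pvGrp_getD])

-- under Pre_, every valid kmer is lowercase-free
theorem pvLF_kmer {sequence alphabet : String} {k : Int}
    (hpre : (sequence.toList.all (fun c => !(PySem.Chars.islower c && alphabet.toList.contains c))) = true) {i : Int}
    (hv : pvValid sequence alphabet k i = true) : pvLF (pvKmer sequence k i) := by
  intro c hc
  unfold pvValid at hv
  rw [List.all_eq_true] at hv
  have hina : c ∈ alphabet.toList := by
    have h1 : c ∈ PySem.Set.ofList alphabet.toList := by simpa using hv c hc
    exact (PySem.Set.mem_ofList _ _).mp h1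
  have hins : c ∈ sequence.toList := by
    unfold pvKmer at hc
    rw [PySem.Str.toList_slice] at hc
    exact PySem.List.mem_of_mem_slice _ _ _ hc
  rw [List.all_eq_true] at hpre
  have h2 := hpre c hins
  simp only [Bool.not_eq_true', Bool.and_eq_false_iff] at h2
  rcases h2 with h | h
  · exact h
  · exfalso
    simp only [List.contains_eq_mem, decide_eq_false_iff_not] at h
    exact h hina

theorem pvLF_mem {sequence alphabet : String} {k : Int}
    (hpre : (sequence.toList.all (fun c => !(PySem.Chars.islower c && alphabet.toList.contains c))) = true) :
    ∀ i ∈ pvXs sequence alphabet k, pvLF (pvKmer sequence k i) := by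
  intro i hi
  unfold pvXs at hi
  exact pvLF_kmer hpre (List.of_mem_filter hi)

-- under the all-lowercase disjunct, every valid kmer is all-lowercase
theorem pvLC_kmer {sequence alphabet : String} {k : Int}
    (hpre : (sequence.toList.all (fun c => !(alphabet.toList.contains c) || PySem.Chars.islower c)) = true) {i : Int}
    (hv : pvValid sequence alphabet k i = true) : pvLC (pvKmer sequence k i) := by
  intro c hc
  unfold pvValid at hv
  rw [List.all_eq_true] at hv
  have hina : c ∈ alphabet.toList := by
    have h1 : c ∈ PySem.Set.ofList alphabet.toList := by simpa using hv c hc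
    exact (PySem.Set.mem_ofList _ _).mp h1
  have hins : c ∈ sequence.toList := by
    unfold pvKmer at hc
    rw [PySem.Str.toList_slice] at hc
    exact PySem.List.mem_of_mem_slice _ _ _ hc
  rw [List.all_eq_true] at hpre
  have h2 := hpre c hins
  rw [Bool.or_eq_true, Bool.not_eq_true'] at h2
  rcases h2 with h | h
  · exfalso
    simp only [List.contains_eq_mem, decide_eq_false_iff_not] at h
    exact h hina
  · exact h

theorem pvLC_mem {sequence alphabet : String} {k : Int}
    (hpre : (sequence.toList.all (fun c => !(alphabet.toList.contains c) || PySem.Chars.islower c)) = true) :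
    ∀ i ∈ pvXs sequence alphabet k, pvLC (pvKmer sequence k i) := by
  intro i hi
  unfold pvXs at hi
  exact pvLC_kmer hpre (List.of_mem_filter hi)

-- A's merge step inserts the canonical key with the canonical position list
theorem pvStep_eq {sequence alphabet : String} {k : Int}
    (hpre : Pre_kmerPositions sequence alphabet k)
    (pp : PySem.Dict String (List Int)) {x : String}
    (hx : x ∈ (pvXs sequence alphabet k).map (fun i => pvKmer sequence k i)) :
    pvStep sequence alphabet k pp x = pp.insert (pvCanon x) (pvW sequence alphabet k (pvCanon x)) := by
  obtain ⟨i0, hi0, rfl⟩ := List.mem_map.mp hx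
  set x := pvKmer sequence k i0 with hxdef
  set rx := getReverseComplement x with hrxdef
  have hpair : (pvXs sequence alphabet k).Pairwise (· < ·) := pvXs_pairwise sequence alphabet k
  simp only [pvStep]
  rw [pvGrp_getD]
  rcases hpre with hd1 | hd2
  · -- no lowercase alphabet character in the sequence: the reverse complement is an involution
    have hLFx : pvLF (pvKmer sequence k i0) := pvLF_mem hd1 i0 hi0
    rcases lt_trichotomy x rx with hlt | heq | hgt
    · have hcx : pvCanon x = x := if_pos hlt.le
      rw [if_pos hlt, hcx]
      congr 1
      have hwx : pvW sequence alphabet k x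
          = (pvXs sequence alphabet k).filter
              (fun i => (pvKmer sequence k i == x) || (pvKmer sequence k i == rx)) := by
        unfold pvW
        refine List.filter_congr (fun i hi => ?_)
        rw [Bool.eq_iff_iff]
        simp only [beq_iff_eq, Bool.or_eq_true]
        rw [show (pvCanon (pvKmer sequence k i) = x) ↔ (pvCanon (pvKmer sequence k i) = pvCanon x) by rw [hcx]]
        exact pvCanon_fiber hLFx (pvLF_mem hd1 i hi)
      rw [hwx]
      refine PySem.List.sorted_eq_of_perm_of_pairwise_lt _ _ _ ?_ ?_
      · exact (pvFilter_or_perm _ _ _ (fun i _ h => hlt.ne (by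
          rcases h with ⟨h1, h2⟩
          rw [beq_iff_eq] at h1 h2
          rw [← h1, h2]))).symm
      · exact List.Pairwise.sublist List.filter_sublist hpair
    · have hcx : pvCanon x = x := if_pos heq.le
      rw [if_neg (by rw [← heq.trans hrxdef]; exact lt_irrefl x), if_neg (by rw [← heq.trans hrxdef]; exact lt_irrefl x), hcx]
      congr 1
      unfold pvW pvPos
      refine (List.filter_congr (fun i hi => ?_)).symm
      rw [Bool.eq_iff_iff]
      simp only [beq_iff_eq]
      rw [show (pvCanon (pvKmer sequence k i) = x) ↔ (pvCanon (pvKmer sequence k i) = pvCanon x) by rw [hcx]]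
      rw [pvCanon_fiber hLFx (pvLF_mem hd1 i hi), ← heq.trans hrxdef]
      tauto
    · have hcx : pvCanon x = rx := if_neg (not_le.mpr hgt)
      rw [if_neg (asymm hgt), if_pos hgt, hcx]
      congr 1
      have hwx : pvW sequence alphabet k rx
          = (pvXs sequence alphabet k).filter
              (fun i => (pvKmer sequence k i == rx) || (pvKmer sequence k i == x)) := by
        unfold pvW
        refine List.filter_congr (fun i hi => ?_)
        rw [Bool.eq_iff_iff]
        simp only [beq_iff_eq, Bool.or_eq_true]
        rw [show (pvCanon (pvKmer sequence k i) = rx) ↔ (pvCanon (pvKmer sequence k i) = pvCanon x) by rw [hcx]]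
        rw [pvCanon_fiber hLFx (pvLF_mem hd1 i hi), ← hrxdef]
        exact or_comm
      rw [hwx]
      refine PySem.List.sorted_eq_of_perm_of_pairwise_lt _ _ _ ?_ ?_
      · exact (pvFilter_or_perm _ _ _ (fun i _ h => hgt.ne (by
          rcases h with ⟨h1, h2⟩
          rw [beq_iff_eq] at h1 h2
          rw [← h1, h2]))).symm
      · exact List.Pairwise.sublist List.filter_sublist hpair
  · -- every alphabet character of the sequence is lowercase: valid kmers are all-lowercase
    have hLCx : pvLC (pvKmer sequence k i0) := pvLC_mem hd2 i0 hi0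
    by_cases hxe : x = ""
    · rw [if_neg (by rw [hxe, pvRc_empty]; exact lt_irrefl _),
        if_neg (by rw [hxe, pvRc_empty]; exact lt_irrefl _)]
      have hcx : pvCanon x = x := by rw [hxe]; exact pvCanon_empty
      rw [hcx]
      congr 1
      unfold pvW pvPos
      refine (List.filter_congr (fun i hi => ?_)).symm
      rw [Bool.eq_iff_iff]
      simp only [beq_iff_eq]
      rw [hxe]
      exact pvCanon_fiber_empty (pvLC_mem hd2 i hi)
    · have hlt : rx < x := by rw [hrxdef]; exact pvRc_lt hLCx hxe
      have hcx : pvCanon x = rx := by rw [hrxdef]; exact pvCanon_LC hLCx hxe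
      rw [if_neg (asymm hlt), if_pos hlt, hcx]
      congr 1
      have hnil : (pvXs sequence alphabet k).filter (fun i => pvKmer sequence k i == rx) = [] := by
        rw [List.filter_eq_nil_iff]
        intro i hi
        rw [Bool.not_eq_true, beq_eq_false_iff_ne, hrxdef]
        exact pvRc_ne_LC hLCx hxe (pvLC_mem hd2 i hi)
      have hwx : pvW sequence alphabet k rx = pvPos sequence alphabet k x := by
        unfold pvW pvPos
        refine List.filter_congr (fun i hi => ?_)
        rw [Bool.eq_iff_iff]
        simp only [beq_iff_eq]
        rw [show (pvCanon (pvKmer sequence k i) = rx) ↔ (pvCanon (pvKmer sequence k i) = pvCanon x) by rw [hcx]]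
        exact pvCanon_fiber_LC hLCx hxe (pvLC_mem hd2 i hi)
      rw [hnil, List.nil_append, hwx]
      exact PySem.List.sorted_eq_of_perm_of_pairwise_lt _ _ _ (List.Perm.refl _)
        (List.Pairwise.sublist List.filter_sublist hpair)

-- the whole merge pass builds exactly the canonical grouping
theorem pvPhase2 {sequence alphabet : String} {k : Int}
    (hpre : Pre_kmerPositions sequence alphabet k) (S : List String)
    (hS : ∀ x ∈ S, x ∈ (pvXs sequence alphabet k).map (fun i => pvKmer sequence k i)) :
    (S.foldl (pvStep sequence alphabet k) PySem.Dict.empty).items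
      = (PySem.Set.ofList (S.map pvCanon)).map (fun c => (c, pvW sequence alphabet k c)) := by
  induction S using List.reverseRecOn with
  | nil => rfl
  | append_singleton S x ih =>
    have hS' : ∀ y ∈ S, y ∈ (pvXs sequence alphabet k).map (fun i => pvKmer sequence k i) :=
      fun y hy => hS y (by simp [hy])
    have hx : x ∈ (pvXs sequence alphabet k).map (fun i => pvKmer sequence k i) := hS x (by simp)
    have hitems := ih hS'
    have hkeys : (S.foldl (pvStep sequence alphabet k) PySem.Dict.empty).keys
        = PySem.Set.ofList (S.map pvCanon) := by
      unfold PySem.Dict.keys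
      rw [hitems, List.map_map]
      simp [Function.comp_def]
    rw [List.foldl_append, List.foldl_cons, List.foldl_nil, pvStep_eq hpre _ hx,
      List.map_append, List.map_singleton, pvOfList_append_singleton,
      PySem.Dict.items_insert, hitems]
    unfold PySem.Set.add
    rw [pvMem_set_contains, PySem.Dict.contains_eq_decide_mem_keys, hkeys]
    by_cases hc : pvCanon x ∈ PySem.Set.ofList (S.map pvCanon)
    · rw [if_pos (by simp [hc]), if_pos (by simp [hc]), List.map_map]
      refine List.map_congr_left (fun y _ => ?_)
      by_cases hyc : y = pvCanon x
      · subst hyc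
        simp
      · simp [hyc]
    · rw [if_neg (by simp [hc]), if_neg (by simp [hc]), List.map_append, List.map_singleton]

theorem pvA_eq {sequence alphabet : String} {k : Int}
    (hpre : Pre_kmerPositions sequence alphabet k) :
    kmerPositions sequence alphabet k
      = (PySem.Set.ofList ((pvXs sequence alphabet k).map (fun i => pvCanon (pvKmer sequence k i)))).map
          (fun c => (c, pvW sequence alphabet k c)) := by
  have h1 : (PySem.List.pyRange 1 (PySem.Str.len sequence - k + 1)).foldl
      (fun (d : PySem.Dict String (List Int)) i =>
        if ((PySem.Str.slice sequence (some i) (some (i + k))).toList.all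
              (fun base => (PySem.Set.ofList alphabet.toList).contains base)) = true then
          d.insert (PySem.Str.slice sequence (some i) (some (i + k)))
            (d.getD (PySem.Str.slice sequence (some i) (some (i + k))) [] ++ [i])
        else d) PySem.Dict.empty
      = pvGrp (fun i => pvKmer sequence k i) (pvXs sequence alphabet k) := by
    unfold pvGrp pvXs
    exact PySem.List.foldl_if_eq_foldl_filter (pvValid sequence alphabet k)
      (fun (d : PySem.Dict String (List Int)) i => d.modify (pvKmer sequence k i) [] (fun l => l ++ [i])) _ _
  simp only [kmerPositions]
  rw [h1, pvGrp_items]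
  rw [List.foldl_map]
  refine Eq.trans (pvPhase2 hpre
    (PySem.Set.ofList ((pvXs sequence alphabet k).map (fun i => pvKmer sequence k i)))
    (fun x hx => (PySem.Set.mem_ofList _ _).mp hx)) ?_
  rw [pvOfList_map_ofList, List.map_map]
  simp only [Function.comp_def]

theorem pvB_eq (sequence alphabet : String) (k : Int) :
    kmerPositions_alt sequence alphabet k
      = (PySem.Set.ofList ((pvXs sequence alphabet k).map (fun i => pvCanon (pvKmer sequence k i)))).map
          (fun c => (c, pvW sequence alphabet k c)) := by
  have h1 : (PySem.List.pyRange 1 (PySem.Str.len sequence - k + 1)).foldl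
      (fun (d : PySem.Dict String (List Int)) i =>
        if ((PySem.Str.slice sequence (some i) (some (i + k))).toList.all
              (fun base => (PySem.Set.ofList alphabet.toList).contains base)) = true then
          d.modify
            (if PySem.Str.slice sequence (some i) (some (i + k))
                  ≤ getReverseComplement (PySem.Str.slice sequence (some i) (some (i + k))) then
              PySem.Str.slice sequence (some i) (some (i + k))
            else getReverseComplement (PySem.Str.slice sequence (some i) (some (i + k))))
            [] (fun l => l ++ [i])
        else d) PySem.Dict.empty
      = pvGrp (fun i => pvCanon (pvKmer sequence k i)) (pvXs sequence alphabet k) := by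
    unfold pvGrp pvXs
    exact PySem.List.foldl_if_eq_foldl_filter (pvValid sequence alphabet k)
      (fun (d : PySem.Dict String (List Int)) i => d.modify (pvCanon (pvKmer sequence k i)) [] (fun l => l ++ [i])) _ _
  simp only [kmerPositions_alt]
  rw [h1, pvGrp_items]
  rfl

-- ===== VERDICT (by name: the statement is the Claim_ definition above) =====
theorem kmerPositions_spec : Claim_equal_kmerPositions := by
  intro sequence alphabet k _hdom hpre
  unfold Spec_kmerPositions
  rw [pvA_eq hpre, pvB_eq]
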